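-- pv_equiv track=rewrite | github.com/vantuan0128/PYTHON_PTIT | PY01041.py | check
-- ===== SOURCE A (Python) =====
-- def check(s):
--     if int(s) < 10**2 : return False
--     else:
--         for i in range(0,len(s)-1):
--             if int(s[i]) < int(s[i+1]): continue
--             elif int(s[i]) == int(s[i+1]): return False
--             else:
--                 for j in range(i,len(s)-1):
--                     if int(s[j]) > int(s[j + 1]): continue
--                     else: return False
--     return True
-- ===== SOURCE B (Python) =====
-- def check(s):
--     if int(s) < 10**2:
--         return False
--     d = [int(c) for c in s]
--     n = len(d)
--     i = 0
--     while i + 1 < n and d[i] < d[i + 1]: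
--         i += 1
--     while i + 1 < n and d[i] > d[i + 1]:
--         i += 1
--     return i == n - 1
-- ===== Notes on version B (the rewrite author's own statement) =====
-- stated objective: simpler
-- what changed: A's nested loops (outer scan with an inner rescan of the whole decreasing suffix at every position) are replaced by one linear two-phase walk: convert the digits once, walk up while strictly increasing, then walk down while strictly decreasing, and succeed iff the walk reaches the last digit.
-- outside the precondition, e.g. on check('55_55'): A returns False, B raises ValueError
import Mathlib
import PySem

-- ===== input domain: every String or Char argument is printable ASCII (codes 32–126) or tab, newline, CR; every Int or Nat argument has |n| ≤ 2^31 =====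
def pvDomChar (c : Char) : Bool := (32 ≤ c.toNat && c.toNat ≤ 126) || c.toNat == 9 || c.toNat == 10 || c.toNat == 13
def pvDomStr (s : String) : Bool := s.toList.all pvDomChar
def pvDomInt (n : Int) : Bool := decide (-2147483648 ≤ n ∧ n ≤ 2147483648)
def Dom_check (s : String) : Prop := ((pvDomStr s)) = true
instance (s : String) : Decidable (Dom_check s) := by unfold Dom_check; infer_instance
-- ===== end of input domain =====

-- B replaces A's nested outer/inner rescans with one linear two-phase walk (up, then down); simpler, O(n).

-- int(c) for a single character c, as both Pythons evaluate it
def pyDigit? (c : Char) : Option Int := PySem.Int.ofChars? [c]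

-- ===== PORT A =====
-- inner loop: 'for j in range(i, len(s)-1): if int(s[j]) > int(s[j+1]): continue else: return False' (True = fell through)
def checkInner : List Char → Bool
  | a :: b :: r =>
    match pyDigit? a, pyDigit? b with
    | some x, some y => if x > y then checkInner (b :: r) else false
    | _, _ => false      -- ValueError (excluded by Pre_)
  | _ => true

-- outer loop over i in range(0, len(s)-1)
def checkOuter : List Char → Bool
  | a :: b :: r =>
    match pyDigit? a, pyDigit? b with
    | some x, some y =>
      if x < y then checkOuter (b :: r)
      else if x = y then false
      else if checkInner (a :: b :: r) then checkOuter (b :: r) else false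
    | _, _ => false      -- ValueError (excluded by Pre_)
  | _ => true

def check (s : String) : Bool :=
  match PySem.Int.ofStr? s with
  | none => false        -- ValueError at int(s) (excluded by Pre_)
  | some v => if v < 100 then false else checkOuter s.toList

-- ===== PORT B =====
-- second while: walk down while strictly decreasing
def walkDown : List Int → Bool
  | a :: b :: r => if a > b then walkDown (b :: r) else false
  | _ => true            -- i reached n-1

-- first while: walk up while strictly increasing, then hand over to the down walk
def walkUp : List Int → Bool
  | a :: b :: r => if a < b then walkUp (b :: r) else walkDown (a :: b :: r)
  | _ => true

def check_alt (s : String) : Bool :=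
  match PySem.Int.ofStr? s with
  | none => false        -- ValueError at int(s) (excluded by Pre_)
  | some v =>
    if v < 100 then false
    else
      match s.toList.mapM pyDigit? with   -- d = [int(c) for c in s]
      | none => false    -- ValueError (excluded by Pre_)
      | some d => walkUp d

-- ===== PRECONDITION & SPEC =====
-- Pre_ excludes inputs where int() raises: strings int(s) rejects, and strings of value ≥ 100 containing a
-- non-digit character (there A may return False before reaching that character, e.g. "55_55", while B's
-- up-front digit conversion raises ValueError).
def Pre_check (s : String) : Prop :=
  (PySem.Int.ofStr? s).isSome ∧
  ((PySem.Int.ofStr? s).getD 0 < 100 ∨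
    s.toList.all (fun c => ['0', '1', '2', '3', '4', '5', '6', '7', '8', '9'].contains c) = true)
instance (s : String) : Decidable (Pre_check s) := by unfold Pre_check; infer_instance

def pvWitness_check : String := "12321"

def Spec_check (s : String) (out : Bool) : Prop := out = check_alt s
instance (s : String) (out : Bool) : Decidable (Spec_check s out) := by unfold Spec_check; infer_instance

-- ===== CLAIM (what is proved, stated in full; the proofs are below) =====
def Claim_equal_check : Prop := ∀ (s : String), Dom_check s → Pre_check s → Spec_check s (check s)

-- ===== LEMMAS AND PROOFS =====

def digitChars : List Char := ['0', '1', '2', '3', '4', '5', '6', '7', '8', '9']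

theorem pyDigit?_eq {c : Char} (h : c ∈ digitChars) :
    pyDigit? c = some ((c.toNat : Int) - 48) := by
  simp only [digitChars, List.mem_cons, List.not_mem_nil, or_false] at h
  rcases h with h | h | h | h | h | h | h | h | h | h <;> subst h <;> decide

theorem mapM_pyDigit?_eq {l : List Char} (h : ∀ c ∈ l, c ∈ digitChars) :
    l.mapM pyDigit? = some (l.map (fun c => (c.toNat : Int) - 48)) := by
  induction l with
  | nil => rfl
  | cons a t ih =>
    have ha := pyDigit?_eq (h a (by simp))
    have ht := ih (fun c hc => h c (by simp [hc]))
    simp [List.mapM_cons, ha, ht]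

theorem checkInner_eq {l : List Char} (h : ∀ c ∈ l, c ∈ digitChars) :
    checkInner l = walkDown (l.map (fun c => (c.toNat : Int) - 48)) := by
  induction l with
  | nil => rfl
  | cons a t ih =>
    cases t with
    | nil => rfl
    | cons b r =>
      have ha := pyDigit?_eq (h a (by simp))
      have hb := pyDigit?_eq (h b (by simp))
      have ht := ih (fun c hc => h c (by simp [List.mem_cons] at hc ⊢; tauto))
      simp only [checkInner, ha, hb, List.map_cons, walkDown, ht]

theorem checkOuter_of_checkInner {l : List Char} (h : checkInner l = true) :
    checkOuter l = true := by
  induction l with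
  | nil => rfl
  | cons a t ih =>
    cases t with
    | nil => rfl
    | cons b r =>
      rcases hx : pyDigit? a with _ | x
      · simp [checkInner, hx] at h
      rcases hy : pyDigit? b with _ | y
      · simp [checkInner, hx, hy] at h
      simp only [checkInner, hx, hy] at h
      by_cases hxy : x > y
      · rw [if_pos hxy] at h
        have hI : checkInner (a :: b :: r) = true := by
          simp only [checkInner, hx, hy]; rw [if_pos hxy]; exact h
        simp only [checkOuter, hx, hy]
        rw [if_neg (show ¬ x < y by omega), if_neg (show ¬ x = y by omega)]
        simp only [hI, if_true]
        exact ih h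
      · rw [if_neg hxy] at h
        exact absurd h (by simp)

theorem checkOuter_eq {l : List Char} (h : ∀ c ∈ l, c ∈ digitChars) :
    checkOuter l = walkUp (l.map (fun c => (c.toNat : Int) - 48)) := by
  induction l with
  | nil => rfl
  | cons a t ih =>
    cases t with
    | nil => rfl
    | cons b r =>
      have ha := pyDigit?_eq (h a (by simp))
      have hb := pyDigit?_eq (h b (by simp))
      have htail : ∀ c ∈ b :: r, c ∈ digitChars := fun c hc => h c (by simp [List.mem_cons] at hc ⊢; tauto)
      have ht := ih htail
      simp only [checkOuter, ha, hb, List.map_cons, walkUp]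
      by_cases h1 : ((a.toNat : Int) - 48) < ((b.toNat : Int) - 48)
      · rw [if_pos h1, if_pos h1]
        simpa using ht
      · rw [if_neg h1, if_neg h1]
        simp only [walkDown]
        by_cases h2 : ((a.toNat : Int) - 48) = ((b.toNat : Int) - 48)
        · rw [if_pos h2, if_neg (show ¬ ((a.toNat : Int) - 48) > ((b.toNat : Int) - 48) by omega)]
        · rw [if_neg h2]
          have h3 : ((a.toNat : Int) - 48) > ((b.toNat : Int) - 48) := by omega
          rw [if_pos h3]
          have hin : checkInner (a :: b :: r)
              = walkDown (((b.toNat : Int) - 48) :: r.map (fun c => (c.toNat : Int) - 48)) := by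
            have := checkInner_eq (l := a :: b :: r) h
            simp only [List.map_cons, walkDown] at this
            rw [if_pos h3] at this
            exact this
          rcases hI : checkInner (a :: b :: r) with _ | _
          · rw [hI] at hin
            simp only [Bool.false_eq_true, if_false]
            exact hin
          · rw [hI] at hin
            have hItail : checkInner (b :: r) = true := by
              simp only [checkInner, ha, hb] at hI
              rw [if_pos h3] at hI
              exact hI
            simp only [if_true, ← hin]
            rw [ht]
            have hwu : walkUp ((b :: r).map (fun c => (c.toNat : Int) - 48)) = true := by
              rw [← ht]
              exact checkOuter_of_checkInner hItail
            simpa using hwu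

-- ===== VERDICT (by name: the statement is the Claim_ definition above) =====
theorem check_spec : Claim_equal_check := by
  intro s _hdom hpre
  unfold Spec_check check check_alt
  rcases hofs : PySem.Int.ofStr? s with _ | v
  · rfl
  · by_cases hv : v < 100
    · simp [hv]
    · rcases hpre with ⟨_, hdig | hdig⟩
      · rw [hofs] at hdig; simp at hdig; omega
      · have hdig' : ∀ c ∈ s.toList, c ∈ digitChars := by
          intro c hc
          have := List.all_eq_true.mp hdig c hc
          simpa [digitChars] using this
        have hmap := mapM_pyDigit?_eq (l := s.toList) hdig'
        simp only [hv, if_false, hmap]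
        exact checkOuter_eq hdig'
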